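-- pv_equiv track=rewrite | github.com/naginata63/multi-agent-shogun | scripts/genai_monthly_profile_update.py | parse_feedback_yaml
-- ===== SOURCE A (Python) =====
-- def parse_feedback_yaml(text: str) -> list:
--     """genai_feedback.yaml からエントリリストを返す（YAML依存なしの簡易パーサ）。"""
--     entries = []
--     current = {}
--     for line in text.splitlines():
--         line_stripped = line.strip()
--         if line_stripped.startswith("- "):
--             if current:
--                 entries.append(current)
--             current = {}
--             rest = line_stripped[2:]
--         else:
--             rest = line_stripped
--
--         if ":" in rest:
--             key, _, value = rest.partition(":")
--             key = key.strip()
--             value = value.strip().strip('"').strip("'")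
--             if key and value:
--                 current[key] = value
--
--     if current:
--         entries.append(current)
--     return entries
-- ===== SOURCE B (Python) =====
-- def _group_to_dict(group):
--     d = {}
--     for rest in group:
--         if ":" in rest:
--             key, _, value = rest.partition(":")
--             key = key.strip()
--             value = value.strip().strip('"').strip("'")
--             if key and value:
--                 d[key] = value
--     return d
--
--
-- def parse_feedback_yaml(text: str) -> list:
--     """Group lines into records first, then convert each group to a dict."""
--     groups = []
--     cur = []
--     for line in text.splitlines():
--         s = line.strip()
--         if s.startswith("- "):
--             groups.append(cur)
--             cur = [s[2:]]
--         else: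
--             cur.append(s)
--     groups.append(cur)
--     return [d for d in map(_group_to_dict, groups) if d]
-- ===== Notes on version B (the rewrite author's own statement) =====
-- stated objective: alternative
-- what changed: B replaces A's single interleaved loop (mutating a current dict while emitting finished entries) with a two-phase decomposition: first split the lines into record groups at the dash-space list markers (keeping the pre-marker lines as an initial group), then map each group to a dict and keep the non-empty ones.
import Mathlib
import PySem

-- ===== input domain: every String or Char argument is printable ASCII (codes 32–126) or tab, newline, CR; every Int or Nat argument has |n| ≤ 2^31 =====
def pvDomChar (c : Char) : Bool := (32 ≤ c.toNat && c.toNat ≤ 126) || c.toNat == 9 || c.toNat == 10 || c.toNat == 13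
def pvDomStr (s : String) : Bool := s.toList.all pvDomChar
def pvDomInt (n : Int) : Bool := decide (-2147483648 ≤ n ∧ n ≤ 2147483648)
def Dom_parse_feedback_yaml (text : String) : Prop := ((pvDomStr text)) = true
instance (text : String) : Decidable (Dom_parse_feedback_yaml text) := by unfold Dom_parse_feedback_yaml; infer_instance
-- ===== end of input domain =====

-- B groups the lines into records first and then converts each group to a dict (different
-- decomposition, same cost); the per-line key/value parsing is shared, equivalence of return
-- values is proved for all inputs (both programs are total).

-- ===== PORT A =====

-- rest.partition(":") — hand port of str.partition at the FIRST ':' (exact; the unused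
-- no-separator case returns (rest, "") and is only reached when ':' is absent).
def pvPartColon : List Char → List Char × List Char
  | [] => ([], [])
  | c :: cs =>
    if c = ':' then ([], cs)
    else
      let (b, a) := pvPartColon cs
      (c :: b, a)

-- the shared per-line body: «if ":" in rest: key,_,value = rest.partition(":"); … current[key]=value»
def pvParseLine (d : PySem.Dict String String) (rest : List Char) : PySem.Dict String String :=
  if PySem.Chars.isIn [':'] rest then
    let kv := pvPartColon rest
    let key := PySem.Chars.strip kv.1
    let value := PySem.Chars.stripChars (PySem.Chars.stripChars (PySem.Chars.strip kv.2) ['"']) ['\'']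
    if key ≠ [] ∧ value ≠ [] then d.insert (String.ofList key) (String.ofList value) else d
  else d

def parse_feedback_yaml (text : String) : List (List (String × String)) :=
  let lines := (PySem.Str.splitlines text).map String.toList
  let st :=
    lines.foldl
      (fun (st : List (List (String × String)) × PySem.Dict String String) line =>
        let s := PySem.Chars.strip line
        if PySem.Chars.startswith s ['-', ' '] then
          let entries := if st.2.items ≠ [] then st.1 ++ [st.2.items] else st.1
          (entries, pvParseLine PySem.Dict.empty (PySem.List.slice s (some 2) none))
        else
          (st.1, pvParseLine st.2 s))
      ([], PySem.Dict.empty)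
  if st.2.items ≠ [] then st.1 ++ [st.2.items] else st.1

-- ===== PORT B =====

-- «_group_to_dict»: fold the shared per-line body over one group's lines
def pvGroupToDict (g : List (List Char)) : List (String × String) :=
  (g.foldl pvParseLine PySem.Dict.empty).items

def parse_feedback_yaml_alt (text : String) : List (List (String × String)) :=
  let lines := (PySem.Str.splitlines text).map String.toList
  let gst :=
    lines.foldl
      (fun (gst : List (List (List Char)) × List (List Char)) line =>
        let s := PySem.Chars.strip line
        if PySem.Chars.startswith s ['-', ' '] then
          (gst.1 ++ [gst.2], [PySem.List.slice s (some 2) none])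
        else
          (gst.1, gst.2 ++ [s]))
      ([], [])
  let groups := gst.1 ++ [gst.2]
  (groups.map pvGroupToDict).filter (fun d => decide (d ≠ []))

-- ===== PRECONDITION & SPEC =====
def Spec_parse_feedback_yaml (text : String) (out : List (List (String × String))) : Prop := out = parse_feedback_yaml_alt text
instance (text : String) (out : List (List (String × String))) : Decidable (Spec_parse_feedback_yaml text out) := by unfold Spec_parse_feedback_yaml; infer_instance

-- ===== CLAIM (what is proved, stated in full; the proofs are below) =====
def Claim_equal_parse_feedback_yaml : Prop := ∀ (text : String), Dom_parse_feedback_yaml text → Spec_parse_feedback_yaml text (parse_feedback_yaml text)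

-- ===== LEMMAS AND PROOFS =====

-- the common denominator of both programs: emit the records of `lines` given partial record `d`
def pvEmit (d : PySem.Dict String String) : List (List Char) → List (List (String × String))
  | [] => if d.items ≠ [] then [d.items] else []
  | l :: ls =>
    let s := PySem.Chars.strip l
    if PySem.Chars.startswith s ['-', ' '] then
      (if d.items ≠ [] then [d.items] else []) ++
        pvEmit (pvParseLine PySem.Dict.empty (PySem.List.slice s (some 2) none)) ls
    else
      pvEmit (pvParseLine d s) ls

-- A's loop, from an arbitrary state, equals `entries ++ pvEmit d lines`
theorem pvA_fold (lines : List (List Char)) :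
    ∀ (entries : List (List (String × String))) (d : PySem.Dict String String),
      (let st :=
        lines.foldl
          (fun (st : List (List (String × String)) × PySem.Dict String String) line =>
            let s := PySem.Chars.strip line
            if PySem.Chars.startswith s ['-', ' '] then
              let entries := if st.2.items ≠ [] then st.1 ++ [st.2.items] else st.1
              (entries, pvParseLine PySem.Dict.empty (PySem.List.slice s (some 2) none))
            else
              (st.1, pvParseLine st.2 s))
          (entries, d)
       if st.2.items ≠ [] then st.1 ++ [st.2.items] else st.1) = entries ++ pvEmit d lines := by
  induction lines with
  | nil =>
    intro entries d
    by_cases hd : d.items = [] <;> simp [pvEmit, hd]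
  | cons l ls ih =>
    intro entries d
    simp only [List.foldl_cons, pvEmit]
    by_cases h : PySem.Chars.startswith (PySem.Chars.strip l) ['-', ' '] = true
    · simp only [h, if_true]
      rw [ih]
      by_cases hd : d.items ≠ [] <;> simp [hd]
    · simp only [eq_false_of_ne_true h, if_false, Bool.false_eq_true]
      rw [ih]

-- B's grouping loop, post-processed, equals the same `pvEmit` with the current group folded in
theorem pvB_fold (lines : List (List Char)) :
    ∀ (gs : List (List (List Char))) (cur : List (List Char)),
      (let gst :=
        lines.foldl
          (fun (gst : List (List (List Char)) × List (List Char)) line =>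
            let s := PySem.Chars.strip line
            if PySem.Chars.startswith s ['-', ' '] then
              (gst.1 ++ [gst.2], [PySem.List.slice s (some 2) none])
            else
              (gst.1, gst.2 ++ [s]))
          (gs, cur)
       ((gst.1 ++ [gst.2]).map pvGroupToDict).filter (fun d => decide (d ≠ []))) =
      (gs.map pvGroupToDict).filter (fun d => decide (d ≠ [])) ++
        pvEmit (cur.foldl pvParseLine PySem.Dict.empty) lines := by
  induction lines with
  | nil =>
    intro gs cur
    simp only [List.foldl_nil, List.map_append, List.filter_append, pvEmit, pvGroupToDict,
      List.map_cons, List.map_nil, List.filter_cons, List.filter_nil]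
    by_cases hd : (cur.foldl pvParseLine PySem.Dict.empty).items ≠ [] <;> simp [hd]
  | cons l ls ih =>
    intro gs cur
    simp only [List.foldl_cons]
    by_cases h : PySem.Chars.startswith (PySem.Chars.strip l) ['-', ' '] = true
    · simp only [h, if_true, pvEmit]
      rw [ih]
      simp only [List.map_append, List.filter_append, pvGroupToDict, List.map_cons,
        List.map_nil, List.filter_cons, List.filter_nil, List.foldl_cons, List.foldl_nil,
        List.append_assoc]
      by_cases hd : (cur.foldl pvParseLine PySem.Dict.empty).items ≠ [] <;> simp [hd]
    · simp only [eq_false_of_ne_true h, if_false, Bool.false_eq_true, pvEmit]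
      rw [ih, List.foldl_append]
      simp

-- ===== VERDICT (by name: the statement is the Claim_ definition above) =====
theorem parse_feedback_yaml_spec : Claim_equal_parse_feedback_yaml := by
  intro text _
  show parse_feedback_yaml text = parse_feedback_yaml_alt text
  unfold parse_feedback_yaml parse_feedback_yaml_alt
  rw [pvA_fold, pvB_fold]
  simp
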